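-- pv_equiv track=rewrite | github.com/CrVzla/CRISTIAN_VALENZUELA_EA_3 | CRISTIAN_VALENZUELA_EA_3.py | validacion_asiento
-- ===== SOURCE A (Python) =====
-- def validacion_asiento(escenario, asiento_seleccionado):
--     asiento_ocupado = False
--     for fila in range(5):
--         for columna in range(10):
--             asiento_string = f"{fila}{columna}" # Obtengo la posición del asiento usando fila como decena y columna como unidad.
--             asiento = int(asiento_string)+1 # Como valores parten de 0, se suma 1 para cuadrar valor y se convierte a int para  poder sumarle 1.
--             if(asiento_seleccionado == asiento and escenario[fila][columna] == "X"):
--                 asiento_ocupado = True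
--     return asiento_ocupado
-- ===== SOURCE B (Python) =====
-- def validacion_asiento(escenario, asiento_seleccionado):
--     if not (1 <= asiento_seleccionado <= 50):
--         return False
--     fila, columna = divmod(asiento_seleccionado - 1, 10)
--     return escenario[fila][columna] == "X"
-- ===== Notes on version B (the rewrite author's own statement) =====
-- stated objective: simpler
-- what changed: Replaces the 50-iteration double loop with string round-tripping by a range check plus one divmod-based direct cell lookup.
import Mathlib
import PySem

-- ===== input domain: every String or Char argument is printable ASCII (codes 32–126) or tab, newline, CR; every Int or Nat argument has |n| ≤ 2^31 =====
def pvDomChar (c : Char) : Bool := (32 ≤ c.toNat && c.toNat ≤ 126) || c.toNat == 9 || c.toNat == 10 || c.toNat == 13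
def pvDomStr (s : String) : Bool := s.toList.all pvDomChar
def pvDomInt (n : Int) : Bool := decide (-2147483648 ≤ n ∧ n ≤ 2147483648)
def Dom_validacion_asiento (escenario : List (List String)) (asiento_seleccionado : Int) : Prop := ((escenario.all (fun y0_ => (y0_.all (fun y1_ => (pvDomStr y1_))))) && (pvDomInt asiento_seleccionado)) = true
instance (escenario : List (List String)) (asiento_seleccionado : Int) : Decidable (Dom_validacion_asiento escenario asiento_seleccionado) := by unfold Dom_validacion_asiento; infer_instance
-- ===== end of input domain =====

-- B replaces A's 50-iteration double loop (with its string round-trip) by a range check and one divmod-based direct lookup.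

-- ===== PORT A =====
-- faithful port of A's nested loops; the cell reads use .getD, which Pre_ guarantees is never the default
def validacion_asiento (escenario : List (List String)) (asiento_seleccionado : Int) : Bool :=
  (PySem.List.pyRange 0 5 1).foldl (fun acc1 fila =>
    (PySem.List.pyRange 0 10 1).foldl (fun acc2 columna =>
      let asiento_string := PySem.Int.toStr fila ++ PySem.Int.toStr columna
      let asiento := (PySem.Int.ofStr? asiento_string).getD 0 + 1
      if asiento_seleccionado == asiento &&
         ((PySem.List.pyGet? (PySem.List.pyGetD escenario fila []) columna).getD "" == "X")
      then true else acc2) acc1) false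

-- ===== PORT B =====
def validacion_asiento_alt (escenario : List (List String)) (asiento_seleccionado : Int) : Bool :=
  if 1 ≤ asiento_seleccionado ∧ asiento_seleccionado ≤ 50 then
    let fila := PySem.Int.floordiv (asiento_seleccionado - 1) 10
    let columna := PySem.Int.mod (asiento_seleccionado - 1) 10
    (PySem.List.pyGet? (PySem.List.pyGetD escenario fila []) columna).getD "" == "X"
  else false

-- ===== PRECONDITION & SPEC =====
-- Pre_ excludes exactly the inputs where both Pythons raise IndexError: a selected seat in 1..50 whose grid cell is missing.
def Pre_validacion_asiento (escenario : List (List String)) (asiento_seleccionado : Int) : Prop :=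
  1 ≤ asiento_seleccionado → asiento_seleccionado ≤ 50 →
    ((asiento_seleccionado - 1) / 10).toNat < escenario.length ∧
    ((asiento_seleccionado - 1) % 10).toNat < (escenario.getD ((asiento_seleccionado - 1) / 10).toNat []).length
instance (escenario : List (List String)) (asiento_seleccionado : Int) : Decidable (Pre_validacion_asiento escenario asiento_seleccionado) := by unfold Pre_validacion_asiento; infer_instance

def pvWitness_validacion_asiento : List (List String) × Int :=
  ([["X","_","_","_","_","_","_","_","_","_"]], 1)

def Spec_validacion_asiento (escenario : List (List String)) (asiento_seleccionado : Int) (out : Bool) : Prop := out = validacion_asiento_alt escenario asiento_seleccionado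
instance (escenario : List (List String)) (asiento_seleccionado : Int) (out : Bool) : Decidable (Spec_validacion_asiento escenario asiento_seleccionado out) := by unfold Spec_validacion_asiento; infer_instance

-- ===== CLAIM (what is proved, stated in full; the proofs are below) =====
def Claim_equal_validacion_asiento : Prop := ∀ (escenario : List (List String)) (asiento_seleccionado : Int), Dom_validacion_asiento escenario asiento_seleccionado → Pre_validacion_asiento escenario asiento_seleccionado → Spec_validacion_asiento escenario asiento_seleccionado (validacion_asiento escenario asiento_seleccionado)

-- ===== LEMMAS AND PROOFS =====

theorem seat_val (f c : Int) (hf : 0 ≤ f ∧ f < 5) (hc : 0 ≤ c ∧ c < 10) :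
    (PySem.Int.ofStr? (PySem.Int.toStr f ++ PySem.Int.toStr c)).getD 0 = f * 10 + c := by
  obtain ⟨hf1, hf2⟩ := hf; obtain ⟨hc1, hc2⟩ := hc
  interval_cases f <;> interval_cases c <;> decide

theorem foldl_or_if (l : List Int) (P : Int → Bool) (acc : Bool) :
    l.foldl (fun acc x => if P x then true else acc) acc = (acc || l.any P) := by
  induction l generalizing acc with
  | nil => simp
  | cons x xs ih => simp only [List.foldl_cons, ih, List.any_cons]; cases hP : P x <;> simp

theorem foldl_or (l : List Int) (g : Int → Bool) (acc : Bool) :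
    l.foldl (fun a x => a || g x) acc = (acc || l.any g) := by
  induction l generalizing acc with
  | nil => simp
  | cons x xs ih => simp only [List.foldl_cons, ih, List.any_cons]; cases hg : g x <;> simp

-- A as a double 'any' over the arithmetic seat number
theorem validacion_any (esc : List (List String)) (a : Int) :
    validacion_asiento esc a =
    (PySem.List.pyRange 0 5 1).any (fun fila =>
      (PySem.List.pyRange 0 10 1).any (fun columna =>
        a == fila * 10 + columna + 1 &&
          ((PySem.List.pyGet? (PySem.List.pyGetD esc fila []) columna).getD "" == "X"))) := by
  unfold validacion_asiento
  have h1 : (PySem.List.pyRange 0 5 1).foldl (fun acc1 fila =>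
      (PySem.List.pyRange 0 10 1).foldl (fun acc2 columna =>
        let asiento := (PySem.Int.ofStr? (PySem.Int.toStr fila ++ PySem.Int.toStr columna)).getD 0 + 1
        if a == asiento &&
           ((PySem.List.pyGet? (PySem.List.pyGetD esc fila []) columna).getD "" == "X")
        then true else acc2) acc1) false
      = (PySem.List.pyRange 0 5 1).foldl (fun acc1 fila =>
        acc1 || (PySem.List.pyRange 0 10 1).any (fun columna =>
          a == fila * 10 + columna + 1 &&
            ((PySem.List.pyGet? (PySem.List.pyGetD esc fila []) columna).getD "" == "X"))) false := by
    apply PySem.List.foldl_congr_mem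
    intro acc f hf
    rw [PySem.List.mem_pyRange_one] at hf
    have hbody : (PySem.List.pyRange 0 10 1).foldl (fun acc2 columna =>
        let asiento := (PySem.Int.ofStr? (PySem.Int.toStr f ++ PySem.Int.toStr columna)).getD 0 + 1
        if a == asiento &&
           ((PySem.List.pyGet? (PySem.List.pyGetD esc f []) columna).getD "" == "X")
        then true else acc2) acc
        = (PySem.List.pyRange 0 10 1).foldl (fun acc2 columna =>
          if (a == f * 10 + columna + 1 &&
              ((PySem.List.pyGet? (PySem.List.pyGetD esc f []) columna).getD "" == "X"))
          then true else acc2) acc := by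
      apply PySem.List.foldl_congr_mem
      intro acc2 c hc
      rw [PySem.List.mem_pyRange_one] at hc
      simp only [seat_val f c ⟨hf.1, hf.2⟩ ⟨hc.1, hc.2⟩]
    rw [hbody, foldl_or_if]
  rw [h1, foldl_or]
  simp

-- ===== VERDICT (by name: the statement is the Claim_ definition above) =====
theorem validacion_asiento_spec : Claim_equal_validacion_asiento := by
  intro esc a _ _
  unfold Spec_validacion_asiento validacion_asiento_alt
  rw [validacion_any]
  by_cases h : 1 ≤ a ∧ a ≤ 50
  · rw [if_pos h]
    obtain ⟨h1, h2⟩ := h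
    have hF : PySem.Int.floordiv (a - 1) 10 = (a - 1) / 10 :=
      PySem.Int.floordiv_eq_ediv_of_pos (by omega)
    have hC : PySem.Int.mod (a - 1) 10 = (a - 1) % 10 :=
      PySem.Int.mod_eq_emod_of_pos (by omega)
    rw [hF, hC]
    set F := (a - 1) / 10 with hFdef
    set C := (a - 1) % 10 with hCdef
    have hFb : 0 ≤ F ∧ F < 5 := by constructor <;> omega
    have hCb : 0 ≤ C ∧ C < 10 := by constructor <;> omega
    have hsum : F * 10 + C + 1 = a := by omega
    cases hcell : ((PySem.List.pyGet? (PySem.List.pyGetD esc F []) C).getD "" == "X")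
    · rw [Bool.eq_false_iff]
      intro hany
      rw [List.any_eq_true] at hany
      obtain ⟨f, hfmem, hinner⟩ := hany
      rw [List.any_eq_true] at hinner
      obtain ⟨c, hcmem, hcond⟩ := hinner
      rw [PySem.List.mem_pyRange_one] at hfmem hcmem
      rw [Bool.and_eq_true, beq_iff_eq] at hcond
      have hf : f = F := by omega
      have hc : c = C := by omega
      rw [hf, hc] at hcond
      rw [hcond.2] at hcell
      simp at hcell
    · rw [List.any_eq_true]
      refine ⟨F, ?_, ?_⟩
      · rw [PySem.List.mem_pyRange_one]; omega
      · rw [List.any_eq_true]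
        refine ⟨C, ?_, ?_⟩
        · rw [PySem.List.mem_pyRange_one]; omega
        · rw [Bool.and_eq_true, beq_iff_eq]
          exact ⟨by omega, hcell⟩
  · rw [if_neg h, Bool.eq_false_iff]
    intro hany
    rw [List.any_eq_true] at hany
    obtain ⟨f, hfmem, hinner⟩ := hany
    rw [List.any_eq_true] at hinner
    obtain ⟨c, hcmem, hcond⟩ := hinner
    rw [PySem.List.mem_pyRange_one] at hfmem hcmem
    rw [Bool.and_eq_true, beq_iff_eq] at hcond
    exact h ⟨by omega, by omega⟩
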